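-- pv_equiv track=rewrite | github.com/mkern75/EverybodyCodes | TheKingdomOfAlgorithmia2024/q19.py | calc_mapping
-- ===== SOURCE A (Python) =====
-- N8 = [(-1, 0), (-1, 1), (0, 1), (1, 1), (1, 0), (1, -1), (0, -1), (-1, -1)]
--
-- def ff(r, c, m):
--     return r * m + c
--
-- def fr(x, m):
--     return divmod(x, m)
--
-- def rotate(dir, grid, r_centre, c_centre):
--     assert dir in "LR"
--     offset = 1 if dir == "L" else -1
--     mem = []
--     for i in range(8):
--         mem += [grid[r_centre + N8[i][0]][c_centre + N8[i][1]]]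
--     for i in range(8):
--         grid[r_centre + N8[i][0]][c_centre + N8[i][1]] = mem[(i + offset) % 8]
--
-- def calc_mapping(grid, key):
--     n, m = len(grid), len(grid[0])
--
--     gg = [[0] * m for _ in range(n)]
--     for r in range(n):
--         for c in range(m):
--             gg[r][c] = ff(r, c, m)
--
--     i = 0
--     for r in range(1, n - 1):
--         for c in range(1, m - 1):
--             rotate(key[i], gg, r, c)
--             i = (i + 1) % len(key)
--
--     mapping = [[0] * m for _ in range(n)]
--     for r in range(n):
--         for c in range(m):
--             rr, cc = fr(gg[r][c], m)
--             mapping[rr][cc] = ff(r, c, m)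
--     return mapping
-- ===== SOURCE B (Python) =====
-- N8 = [(-1, 0), (-1, 1), (0, 1), (1, 1), (1, 0), (1, -1), (0, -1), (-1, -1)]
--
-- def calc_mapping(grid, key):
--     # Reverse replay: A's result is the inverse of the rotation permutation, so
--     # start from the identity on a flat index array and undo the rotations
--     # (opposite direction, reverse cell order); no separate inversion pass.
--     n, m = len(grid), len(grid[0])
--     flat = list(range(n * m))
--     cells = [(r, c) for r in range(1, n - 1) for c in range(1, m - 1)]
--     for idx in reversed(range(len(cells))):
--         r, c = cells[idx]
--         offset = -1 if key[idx % len(key)] == "L" else 1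
--         pos = [(r + dr) * m + (c + dc) for dr, dc in N8]
--         mem = [flat[p] for p in pos]
--         for i in range(8):
--             flat[pos[i]] = mem[(i + offset) % 8]
--     return [flat[r * m:(r + 1) * m] for r in range(n)]
-- ===== Notes on version B (the rewrite author's own statement) =====
-- stated objective: alternative
-- what changed: B computes the mapping by reverse replay: since A's result is the inverse of the permutation the rotations apply to the identity grid, B starts from a flat identity index array and undoes the rotations (reverse cell order, opposite direction), returning the mapping directly without A's separate grid-fill and inversion passes.
import Mathlib
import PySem

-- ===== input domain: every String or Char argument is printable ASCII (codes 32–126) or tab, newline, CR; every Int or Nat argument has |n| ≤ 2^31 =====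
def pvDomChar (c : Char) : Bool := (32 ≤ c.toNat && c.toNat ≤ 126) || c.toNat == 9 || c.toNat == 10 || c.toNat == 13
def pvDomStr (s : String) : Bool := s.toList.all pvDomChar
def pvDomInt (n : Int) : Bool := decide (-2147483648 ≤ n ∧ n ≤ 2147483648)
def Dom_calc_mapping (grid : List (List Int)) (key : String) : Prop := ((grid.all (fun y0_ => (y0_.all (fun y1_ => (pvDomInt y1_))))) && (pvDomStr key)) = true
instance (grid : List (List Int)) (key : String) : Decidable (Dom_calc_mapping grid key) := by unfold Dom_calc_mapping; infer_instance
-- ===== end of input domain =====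

set_option maxHeartbeats 1000000


-- B re-implements A by reverse replay: A's result is the inverse of the rotation
-- permutation, so B undoes the rotations (reverse cell order, opposite direction)
-- on a flat identity index array, removing the separate inversion pass (objective:
-- alternative algorithmic decomposition, same asymptotic cost).

-- ===== PORT A =====
def ffA (r c m : Nat) : Int := ((r * m + c : Nat) : Int)

def N8A : List (Int × Int) := [(-1,0),(-1,1),(0,1),(1,1),(1,0),(1,-1),(0,-1),(-1,-1)]

-- grid[r][c] reads / writes; all executed accesses are in range (interior cells)
def get2A (g : List (List Int)) (r c : Nat) : Int := (g.getD r []).getD c 0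
def set2A (g : List (List Int)) (r c : Nat) (v : Int) : List (List Int) :=
  g.set r ((g.getD r []).set c v)

def nbA (r c i : Nat) : Nat × Nat :=
  let d := N8A.getD i (0, 0)
  (((r : Int) + d.1).toNat, ((c : Int) + d.2).toNat)

def rotateA (dir : Char) (g : List (List Int)) (r c : Nat) : List (List Int) :=
  let offset : Int := if dir = 'L' then 1 else -1
  let mem := (List.range 8).map (fun i => get2A g (nbA r c i).1 (nbA r c i).2)
  (List.range 8).foldl (fun h i =>
    set2A h (nbA r c i).1 (nbA r c i).2 (mem.getD (((i : Int) + offset) % 8).toNat 0)) g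

def calc_mapping (grid : List (List Int)) (key : String) : List (List Int) :=
  let n := grid.length
  let m := (grid.headD []).length
  let zeros := (List.range n).map (fun _ => (List.range m).map (fun _ => (0 : Int)))
  let gg0 := (List.range n).foldl (fun g r =>
    (List.range m).foldl (fun g c => set2A g r c (ffA r c m)) g) zeros
  let st := (List.range' 1 (n - 2)).foldl (fun (st : List (List Int) × Nat) r =>
      (List.range' 1 (m - 2)).foldl (fun st c =>
        (rotateA (key.toList.getD st.2 ' ') st.1 r c, (st.2 + 1) % key.length)) st) (gg0, 0)
  (List.range n).foldl (fun mp r => (List.range m).foldl (fun mp c =>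
      let v := get2A st.1 r c
      set2A mp (PySem.Int.floordiv v (m : Int)).toNat (PySem.Int.mod v (m : Int)).toNat
        (ffA r c m)) mp) zeros

-- ===== PORT B =====
-- one iteration of Source B's reverse loop (the loop body, as a named helper)
def stepB (m : Nat) (key : String) (cells : List (Nat × Nat)) (fl : List Int) (idx : Nat) :
    List Int :=
  let rc := cells.getD idx (0, 0)
  let offset : Int := if key.toList.getD (idx % key.length) ' ' = 'L' then -1 else 1
  let pos := ([(-1,0),(-1,1),(0,1),(1,1),(1,0),(1,-1),(0,-1),(-1,-1)] : List (Int × Int)).map (fun d =>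
    ((rc.1 : Int) + d.1).toNat * m + ((rc.2 : Int) + d.2).toNat)
  let mem := pos.map (fun p => fl.getD p 0)
  (List.range 8).foldl (fun fl i =>
    fl.set (pos.getD i 0) (mem.getD (((i : Int) + offset) % 8).toNat 0)) fl

def calc_mapping_alt (grid : List (List Int)) (key : String) : List (List Int) :=
  let n := grid.length
  let m := (grid.headD []).length
  let flat0 := (List.range (n * m)).map (fun (p : Nat) => (p : Int))
  let cells := (List.range' 1 (n - 2)).flatMap (fun r =>
    (List.range' 1 (m - 2)).map (fun c => (r, c)))
  let flat := ((List.range cells.length).reverse).foldl (stepB m key cells) flat0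
  (List.range n).map (fun r => (flat.drop (r * m)).take m)

-- ===== PRECONDITION & SPEC =====
-- Pre_ = exactly the inputs where Python A returns: grid nonempty (grid[0] would raise
-- IndexError), and if interior cells exist, key nonempty (ZeroDivisionError on i % 0)
-- with every USED key character (the first min(#cells, len(key)) of them) in "LR"
-- (assert failure otherwise).
def Pre_calc_mapping (grid : List (List Int)) (key : String) : Prop :=
  grid ≠ [] ∧
  (0 < (grid.length - 2) * ((grid.headD []).length - 2) →
    key ≠ "" ∧ ∀ j, j < min ((grid.length - 2) * ((grid.headD []).length - 2)) key.length →
      key.toList.getD j ' ' = 'L' ∨ key.toList.getD j ' ' = 'R')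
instance (grid : List (List Int)) (key : String) : Decidable (Pre_calc_mapping grid key) := by
  unfold Pre_calc_mapping; infer_instance

def pvWitness_calc_mapping : List (List Int) × String := ([[1,2,3],[4,5,6],[7,8,9]], "L")

def Spec_calc_mapping (grid : List (List Int)) (key : String) (out : List (List Int)) : Prop :=
  out = calc_mapping_alt grid key
instance (grid : List (List Int)) (key : String) (out : List (List Int)) :
    Decidable (Spec_calc_mapping grid key out) := by unfold Spec_calc_mapping; infer_instance

-- ===== CLAIM (what is proved, stated in full; the proofs are below) =====
def Claim_equal_calc_mapping : Prop := ∀ (grid : List (List Int)) (key : String),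
  Dom_calc_mapping grid key → Pre_calc_mapping grid key →
  Spec_calc_mapping grid key (calc_mapping grid key)

-- ===== LEMMAS AND PROOFS =====

-- ---- arithmetic on flat positions p = r*m + c ----
theorem cell_lt {a b n m : Nat} (ha : a < n) (hb : b < m) : a * m + b < n * m := by
  have h1 : a * m + b < (a + 1) * m := by nlinarith
  have h2 : (a + 1) * m ≤ n * m := Nat.mul_le_mul_right m ha
  omega

theorem flat_div {a b m : Nat} (hb : b < m) : (a * m + b) / m = a ∧ (a * m + b) % m = b := by
  have hm : 0 < m := by omega
  constructor
  · rw [Nat.mul_comm, Nat.mul_add_div hm, Nat.div_eq_of_lt hb]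
    omega
  · rw [Nat.mul_comm, Nat.mul_add_mod, Nat.mod_eq_of_lt hb]


theorem flat_inj {a b a' b' m : Nat} (hb : b < m) (hb' : b' < m)
    (h : a * m + b = a' * m + b') : a = a' ∧ b = b' := by
  have h1 := flat_div (a := a) hb
  have h2 := flat_div (a := a') hb'
  constructor
  · rw [← h1.1, ← h2.1, h]
  · rw [← h1.2, ← h2.2, h]

-- ---- getD / set basics ----
theorem getD_mem' {α : Type} {l : List α} {i : Nat} {d : α} (h : i < l.length) :
    l.getD i d ∈ l := by
  rw [List.getD_eq_getElem l d h]; exact List.getElem_mem h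

theorem getD_set {α : Type} {l : List α} {i j : Nat} {x d : α} :
    (l.set i x).getD j d = if j = i ∧ i < l.length then x else l.getD j d := by
  by_cases h : i = j
  · subst h
    by_cases h2 : i < l.length
    · simp [List.getD_eq_getElem?_getD, List.getElem?_set, h2]
    · have hn : l[i]? = none := by rw [List.getElem?_eq_none_iff]; omega
      simp [List.getD_eq_getElem?_getD, List.getElem?_set, h2, hn]
  · have hcond : ¬(j = i ∧ i < l.length) := fun hh => h hh.1.symm
    simp [List.getD_eq_getElem?_getD, List.getElem?_set, h, hcond]

def Shape (g : List (List Int)) (n m : Nat) : Prop :=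
  g.length = n ∧ ∀ row ∈ g, row.length = m

theorem shape_set2A {g : List (List Int)} {n m r c : Nat} {v : Int}
    (hs : Shape g n m) (hr : r < n) : Shape (set2A g r c v) n m := by
  obtain ⟨hl, hrow⟩ := hs
  refine ⟨by simp [set2A, hl], ?_⟩
  intro row hmem
  rcases List.mem_or_eq_of_mem_set hmem with h | h
  · exact hrow _ h
  · subst h; rw [List.length_set]
    exact hrow _ (getD_mem' (by omega))

theorem get2A_set2A {g : List (List Int)} {n m r' c' a b : Nat} {v : Int}
    (hs : Shape g n m) (hr' : r' < n) (hc' : c' < m) :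
    get2A (set2A g r' c' v) a b = if a = r' ∧ b = c' then v else get2A g a b := by
  obtain ⟨hl, hrow⟩ := hs
  have hrl : (g.getD r' []).length = m := hrow _ (getD_mem' (by omega))
  unfold get2A set2A
  rw [getD_set (l := g)]
  by_cases ha : a = r'
  · subst ha
    rw [if_pos ⟨rfl, by omega⟩, getD_set]
    by_cases hb : b = c'
    · subst hb
      rw [if_pos ⟨rfl, by omega⟩, if_pos ⟨rfl, rfl⟩]
    · rw [if_neg (fun hh => hb hh.1), if_neg (fun hh => hb hh.2)]
  · simp [ha]

theorem get2A_eq_gf {g : List (List Int)} {m r c : Nat} (hc : c < m) :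
    get2A g r c = get2A g ((r * m + c) / m) ((r * m + c) % m) := by
  rw [(flat_div hc).1, (flat_div hc).2]

-- flattened view: gf m g p = g[p / m][p % m]
def gf (m : Nat) (g : List (List Int)) (p : Nat) : Int := get2A g (p / m) (p % m)

-- ---- scatter lemmas: a fold of set2A's at distinct cells ----
def setsFold (g : List (List Int)) (L : List ((Nat × Nat) × Int)) : List (List Int) :=
  L.foldl (fun h x => set2A h x.1.1 x.1.2 x.2) g

theorem setsFold_shape {g : List (List Int)} {n m : Nat} :
    ∀ {L : List ((Nat × Nat) × Int)}, Shape g n m → (∀ x ∈ L, x.1.1 < n) →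
    Shape (setsFold g L) n m := by
  intro L
  induction L generalizing g with
  | nil => intro hs _; exact hs
  | cons y T ih =>
    intro hs hb
    exact ih (shape_set2A hs (hb y (by simp))) (fun x hx => hb x (by simp [hx]))

theorem setsFold_untouched {g : List (List Int)} {n m a b : Nat}
    {L : List ((Nat × Nat) × Int)} (hs : Shape g n m)
    (hb : ∀ x ∈ L, x.1.1 < n ∧ x.1.2 < m)
    (hne : ∀ x ∈ L, ¬(a = x.1.1 ∧ b = x.1.2)) :
    get2A (setsFold g L) a b = get2A g a b := by
  induction L generalizing g with
  | nil => rfl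
  | cons y T ih =>
    have hy := hb y (by simp)
    have : get2A (setsFold (set2A g y.1.1 y.1.2 y.2) T) a b
        = get2A (set2A g y.1.1 y.1.2 y.2) a b :=
      ih (shape_set2A hs hy.1) (fun x hx => hb x (by simp [hx]))
        (fun x hx => hne x (by simp [hx]))
    show get2A (setsFold (set2A g y.1.1 y.1.2 y.2) T) a b = get2A g a b
    rw [this, get2A_set2A hs hy.1 hy.2, if_neg (hne y (by simp))]

theorem setsFold_hit {g : List (List Int)} {n m : Nat}
    {L : List ((Nat × Nat) × Int)} {x0 : (Nat × Nat) × Int} (hs : Shape g n m)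
    (hb : ∀ x ∈ L, x.1.1 < n ∧ x.1.2 < m)
    (hpw : L.Pairwise (fun x y => x.1 ≠ y.1)) (hx0 : x0 ∈ L) :
    get2A (setsFold g L) x0.1.1 x0.1.2 = x0.2 := by
  induction L generalizing g with
  | nil => simp at hx0
  | cons y T ih =>
    have hy := hb y (by simp)
    rcases List.mem_cons.mp hx0 with h | h
    · subst h
      show get2A (setsFold (set2A g x0.1.1 x0.1.2 x0.2) T) x0.1.1 x0.1.2 = x0.2
      rw [setsFold_untouched (shape_set2A hs hy.1) (fun x hx => hb x (by simp [hx]))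
        (fun x hx => ?_), get2A_set2A hs hy.1 hy.2, if_pos ⟨rfl, rfl⟩]
      rintro ⟨h1, h2⟩
      exact (List.pairwise_cons.mp hpw).1 x hx (Prod.ext h1 h2)
    · exact ih (shape_set2A hs hy.1) (fun x hx => hb x (by simp [hx]))
        (List.pairwise_cons.mp hpw).2 h

-- ---- flat-list scatter lemmas (B side) ----
def setsF (fl : List Int) (L : List (Nat × Int)) : List Int :=
  L.foldl (fun f x => f.set x.1 x.2) fl

theorem setsF_length {fl : List Int} {L : List (Nat × Int)} :
    (setsF fl L).length = fl.length := by
  induction L generalizing fl with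
  | nil => rfl
  | cons y T ih => show (setsF _ T).length = _; rw [ih]; simp

theorem setsF_untouched {fl : List Int} {p : Nat} {L : List (Nat × Int)}
    (hne : ∀ x ∈ L, p ≠ x.1) : (setsF fl L).getD p 0 = fl.getD p 0 := by
  induction L generalizing fl with
  | nil => rfl
  | cons y T ih =>
    show (setsF _ T).getD p 0 = _
    rw [ih (fun x hx => hne x (by simp [hx])), getD_set,
      if_neg (by rintro ⟨h, _⟩; exact hne y (by simp) h)]

theorem setsF_hit {fl : List Int} {L : List (Nat × Int)} {x0 : Nat × Int}
    (hb : x0.1 < fl.length) (hpw : L.Pairwise (fun x y => x.1 ≠ y.1)) (hx0 : x0 ∈ L) :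
    (setsF fl L).getD x0.1 0 = x0.2 := by
  induction L generalizing fl with
  | nil => simp at hx0
  | cons y T ih =>
    rcases List.mem_cons.mp hx0 with h | h
    · subst h
      show (setsF (fl.set x0.1 x0.2) T).getD x0.1 0 = x0.2
      rw [setsF_untouched (fun x hx => (List.pairwise_cons.mp hpw).1 x hx),
        getD_set, if_pos ⟨rfl, by simpa using hb⟩]
    · exact ih (by simpa using hb) (List.pairwise_cons.mp hpw).2 h

-- ---- the 8 neighbours of an interior cell ----
def Intr (n m r c : Nat) : Prop := 1 ≤ r ∧ r + 1 < n ∧ 1 ≤ c ∧ c + 1 < m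

def nbp (m r c i : Nat) : Nat := (nbA r c i).1 * m + (nbA r c i).2

theorem nbA_bounds {n m r c i : Nat} (h : Intr n m r c) (hi : i < 8) :
    (nbA r c i).1 < n ∧ (nbA r c i).2 < m := by
  obtain ⟨h1, h2, h3, h4⟩ := h
  interval_cases i <;> simp [nbA, N8A] <;> omega

theorem nbA_col_lt {m r c i : Nat} (hc : 1 ≤ c) (hm : c + 1 < m) (hi : i < 8) :
    (nbA r c i).2 < m := by
  interval_cases i <;> simp [nbA, N8A] <;> omega

theorem nbA_ne {r c i j : Nat} (hr : 1 ≤ r) (hc : 1 ≤ c) (hi : i < 8) (hj : j < 8)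
    (hij : i ≠ j) : nbA r c i ≠ nbA r c j := by
  interval_cases i <;> interval_cases j <;>
    simp_all [nbA, N8A, Prod.ext_iff] <;> omega

theorem nbp_lt {n m r c i : Nat} (h : Intr n m r c) (hi : i < 8) :
    nbp m r c i < n * m := by
  have := nbA_bounds h hi
  exact cell_lt this.1 this.2

theorem nbp_ne {m r c i j : Nat} (hr : 1 ≤ r) (hc : 1 ≤ c) (hm : c + 1 < m)
    (hi : i < 8) (hj : j < 8) (hij : i ≠ j) : nbp m r c i ≠ nbp m r c j := by
  intro h
  have h2 := flat_inj (nbA_col_lt hc hm hi) (nbA_col_lt hc hm hj) h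
  exact nbA_ne hr hc hi hj hij (Prod.ext h2.1 h2.2)

-- index of flat position p among the 8 neighbours (if any)
def idx8 (m r c p : Nat) : Option Nat :=
  if p = nbp m r c 0 then some 0 else if p = nbp m r c 1 then some 1 else
  if p = nbp m r c 2 then some 2 else if p = nbp m r c 3 then some 3 else
  if p = nbp m r c 4 then some 4 else if p = nbp m r c 5 then some 5 else
  if p = nbp m r c 6 then some 6 else if p = nbp m r c 7 then some 7 else none

theorem idx8_some {m r c p i : Nat} (h : idx8 m r c p = some i) :
    i < 8 ∧ nbp m r c i = p := by
  unfold idx8 at h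
  split_ifs at h <;> simp_all <;> omega

theorem idx8_none {m r c p : Nat} (h : idx8 m r c p = none) :
    ∀ i, i < 8 → nbp m r c i ≠ p := by
  unfold idx8 at h
  split_ifs at h with h0 h1 h2 h3 h4 h5 h6 h7 <;>
    first
    | exact Option.noConfusion h
    | (intro i hi; interval_cases i <;> simp_all [eq_comm])

theorem idx8_nbp {m r c j : Nat} (hr : 1 ≤ r) (hc : 1 ≤ c) (hm : c + 1 < m)
    (hj : j < 8) : idx8 m r c (nbp m r c j) = some j := by
  have ne : ∀ i j : Nat, i < 8 → j < 8 → i ≠ j → nbp m r c j ≠ nbp m r c i := by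
    intro i j hi hj hij
    exact nbp_ne hr hc hm hj hi (by omega)
  unfold idx8
  interval_cases j <;>
    simp [ne 0 _ (by omega) (by omega), ne 1 _ (by omega) (by omega),
      ne 2 _ (by omega) (by omega), ne 3 _ (by omega) (by omega),
      ne 4 _ (by omega) (by omega), ne 5 _ (by omega) (by omega),
      ne 6 _ (by omega) (by omega)]

-- the position permutation of one rotation (offset o)
def sig (m r c : Nat) (o : Int) (p : Nat) : Nat :=
  match idx8 m r c p with
  | some i => nbp m r c (((i : Int) + o) % 8).toNat
  | none => p

theorem sig_lt {n m r c : Nat} {o : Int} {p : Nat} (h : Intr n m r c) (hp : p < n * m) :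
    sig m r c o p < n * m := by
  unfold sig
  cases hx : idx8 m r c p with
  | none => exact hp
  | some i =>
    have := idx8_some hx
    exact nbp_lt h (by omega)

theorem sig_sig {n m r c : Nat} (h : Intr n m r c) (o : Int) (p : Nat) :
    sig m r c o (sig m r c (-o) p) = p := by
  obtain ⟨h1, h2, h3, h4⟩ := h
  unfold sig
  cases hx : idx8 m r c p with
  | none => simp [hx]
  | some i =>
    obtain ⟨hi8, hnbp⟩ := idx8_some hx
    have ht : (((i : Int) + -o) % 8).toNat < 8 := by omega
    rw [idx8_nbp h1 h3 h4 ht]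
    have hcast : ((((((i : Int) + -o) % 8).toNat : Nat) : Int) + o) % 8 = (i : Int) := by
      omega
    show nbp m r c (((((((i : Int) + -o) % 8).toNat : Nat) : Int) + o) % 8).toNat = p
    rw [hcast]
    simpa using hnbp

-- ---- characterisation of A's rotate (and B's flat rotate) via sig ----
def offA (d : Char) : Int := if d = 'L' then 1 else -1

theorem pairwise_range8 :
    (List.range 8).Pairwise (fun i j => i < j ∧ j < 8) := by decide

theorem rot_shape {g : List (List Int)} {n m r c : Nat} {d : Char}
    (hs : Shape g n m) (h : Intr n m r c) : Shape (rotateA d g r c) n m := by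
  simp only [rotateA]
  rw [show (if d = 'L' then (1 : Int) else -1) = offA d from rfl]
  rw [show ((List.range 8).foldl (fun h i =>
      set2A h (nbA r c i).1 (nbA r c i).2
        (((List.range 8).map (fun i => get2A g (nbA r c i).1 (nbA r c i).2)).getD
          (((i : Int) + offA d) % 8).toNat 0)) g)
    = setsFold g ((List.range 8).map (fun i => ((nbA r c i),
        ((List.range 8).map (fun i => get2A g (nbA r c i).1 (nbA r c i).2)).getD
          (((i : Int) + offA d) % 8).toNat 0))) from by
    simp only [setsFold, List.foldl_map]]
  apply setsFold_shape hs
  intro x hx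
  simp only [List.mem_map, List.mem_range] at hx
  obtain ⟨i, hi, rfl⟩ := hx
  exact (nbA_bounds h hi).1

theorem gf_rot {g : List (List Int)} {n m r c p : Nat} {d : Char}
    (hs : Shape g n m) (h : Intr n m r c) (hp : p < n * m) :
    gf m (rotateA d g r c) p = gf m g (sig m r c (offA d) p) := by
  obtain ⟨h1, h2, h3, h4⟩ := h
  have hmem : ∀ t, t < 8 →
      ((List.range 8).map (fun i => get2A g (nbA r c i).1 (nbA r c i).2)).getD t 0
      = get2A g (nbA r c t).1 (nbA r c t).2 := by
    intro t ht
    rw [List.getD_eq_getElem?_getD, List.getElem?_map, List.getElem?_range ht]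
    rfl
  simp only [rotateA]
  rw [show (if d = 'L' then (1 : Int) else -1) = offA d from rfl]
  rw [show ((List.range 8).foldl (fun h i =>
      set2A h (nbA r c i).1 (nbA r c i).2
        (((List.range 8).map (fun i => get2A g (nbA r c i).1 (nbA r c i).2)).getD
          (((i : Int) + offA d) % 8).toNat 0)) g)
    = setsFold g ((List.range 8).map (fun i => ((nbA r c i),
        ((List.range 8).map (fun i => get2A g (nbA r c i).1 (nbA r c i).2)).getD
          (((i : Int) + offA d) % 8).toNat 0))) from by
    simp only [setsFold, List.foldl_map]]
  have hb : ∀ x ∈ (List.range 8).map (fun i => ((nbA r c i),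
      ((List.range 8).map (fun i => get2A g (nbA r c i).1 (nbA r c i).2)).getD
        (((i : Int) + offA d) % 8).toNat 0)),
      x.1.1 < n ∧ x.1.2 < m := by
    intro x hx
    simp only [List.mem_map, List.mem_range] at hx
    obtain ⟨i, hi, rfl⟩ := hx
    exact nbA_bounds ⟨h1, h2, h3, h4⟩ hi
  have hpw : ((List.range 8).map (fun i => ((nbA r c i),
      ((List.range 8).map (fun i => get2A g (nbA r c i).1 (nbA r c i).2)).getD
        (((i : Int) + offA d) % 8).toNat 0))).Pairwise
      (fun x y => x.1 ≠ y.1) := by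
    apply List.Pairwise.map _ _ pairwise_range8
    intro a b hab
    exact nbA_ne h1 h3 (by omega) hab.2 (by omega)
  cases hx : idx8 m r c p with
  | none =>
    have hne := idx8_none hx
    have hsig : sig m r c (offA d) p = p := by unfold sig; rw [hx]
    unfold gf
    rw [hsig, setsFold_untouched hs hb ?_]
    intro x hmx
    simp only [List.mem_map, List.mem_range] at hmx
    obtain ⟨i, hi, rfl⟩ := hmx
    rintro ⟨hh1, hh2⟩
    apply hne i hi
    simp only [nbp]
    rw [← hh1, ← hh2, Nat.mul_comm]
    exact Nat.div_add_mod p m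
  | some i =>
    obtain ⟨hi8, hnbp⟩ := idx8_some hx
    have hcol := nbA_col_lt (r := r) h3 h4 hi8
    have ht : (((i : Int) + offA d) % 8).toNat < 8 := by
      unfold offA; split <;> omega
    have hhit := setsFold_hit (x0 := ((nbA r c i),
        ((List.range 8).map (fun i => get2A g (nbA r c i).1 (nbA r c i).2)).getD
          (((i : Int) + offA d) % 8).toNat 0)) hs hb hpw
      (by
        simp only [List.mem_map, List.mem_range]
        exact ⟨i, hi8, rfl⟩)
    have hpd : p / m = (nbA r c i).1 ∧ p % m = (nbA r c i).2 := by
      rw [← hnbp]; exact flat_div hcol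
    unfold gf
    rw [hpd.1, hpd.2, hhit, hmem _ ht]
    unfold sig
    rw [hx]
    have hcol' := nbA_col_lt (r := r) h3 h4 ht
    show _ = get2A g (nbp m r c (((i : Int) + offA d) % 8).toNat / m)
      (nbp m r c (((i : Int) + offA d) % 8).toNat % m)
    unfold nbp
    rw [(flat_div hcol').1, (flat_div hcol').2]

-- ---- composite permutation of a list of steps ----
def keyAt (key : String) (j : Nat) : Char := key.toList.getD (j % key.length) ' '

def comp (m : Nat) (key : String) (sgn : Int) : List ((Nat × Nat) × Nat) → Nat → Nat
  | [], p => p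
  | s :: T, p => sig m s.1.1 s.1.2 (sgn * offA (keyAt key s.2)) (comp m key sgn T p)

def ValidL (n m : Nat) (L : List ((Nat × Nat) × Nat)) : Prop :=
  ∀ s ∈ L, Intr n m s.1.1 s.1.2

theorem comp_lt {n m : Nat} {key : String} {sgn : Int} {L : List ((Nat × Nat) × Nat)}
    {p : Nat} (hv : ValidL n m L) (hp : p < n * m) : comp m key sgn L p < n * m := by
  induction L with
  | nil => exact hp
  | cons s T ih =>
    exact sig_lt (hv s (by simp)) (ih (fun x hx => hv x (by simp [hx])))

theorem comp_append {m : Nat} {key : String} {sgn : Int} {L : List ((Nat × Nat) × Nat)}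
    {s : (Nat × Nat) × Nat} {p : Nat} :
    comp m key sgn (L ++ [s]) p
      = comp m key sgn L (sig m s.1.1 s.1.2 (sgn * offA (keyAt key s.2)) p) := by
  induction L with
  | nil => rfl
  | cons t T ih => simp only [List.cons_append, comp, ih]

theorem comp_inv1 {n m : Nat} {key : String} {L : List ((Nat × Nat) × Nat)} {p : Nat}
    (hv : ValidL n m L) (hp : p < n * m) :
    comp m key 1 L (comp m key (-1) L.reverse p) = p := by
  induction L generalizing p with
  | nil => rfl
  | cons s T ih =>
    have hsv := hv s (by simp)
    have hTv : ValidL n m T := fun x hx => hv x (by simp [hx])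
    rw [List.reverse_cons, comp_append]
    show sig m s.1.1 s.1.2 (1 * offA (keyAt key s.2)) (comp m key 1 T
      (comp m key (-1) T.reverse (sig m s.1.1 s.1.2 ((-1) * offA (keyAt key s.2)) p))) = p
    rw [ih hTv (sig_lt hsv hp)]
    have := sig_sig hsv (offA (keyAt key s.2)) p
    simpa using this

theorem comp_inv2 {n m : Nat} {key : String} {L : List ((Nat × Nat) × Nat)} {p : Nat}
    (hv : ValidL n m L) (hp : p < n * m) :
    comp m key (-1) L.reverse (comp m key 1 L p) = p := by
  induction L generalizing p with
  | nil => rfl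
  | cons s T ih =>
    have hsv := hv s (by simp)
    have hTv : ValidL n m T := fun x hx => hv x (by simp [hx])
    rw [List.reverse_cons, comp_append]
    show comp m key (-1) T.reverse (sig m s.1.1 s.1.2 ((-1) * offA (keyAt key s.2))
      (sig m s.1.1 s.1.2 (1 * offA (keyAt key s.2)) (comp m key 1 T p))) = p
    have hss := sig_sig hsv (-(offA (keyAt key s.2))) (comp m key 1 T p)
    simp only [neg_neg] at hss
    rw [show ((-1 : Int)) * offA (keyAt key s.2) = -(offA (keyAt key s.2)) by ring,
      show ((1 : Int)) * offA (keyAt key s.2) = offA (keyAt key s.2) by ring, hss]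
    exact ih hTv hp

-- ---- A's rotation phase as runA ----
def runA (key : String) : List ((Nat × Nat) × Nat) → List (List Int) → List (List Int)
  | [], g => g
  | s :: T, g => runA key T (rotateA (keyAt key s.2) g s.1.1 s.1.2)

theorem runA_spec {n m : Nat} {key : String} :
    ∀ {L : List ((Nat × Nat) × Nat)} {g : List (List Int)}, ValidL n m L → Shape g n m →
    Shape (runA key L g) n m ∧
      ∀ p, p < n * m → gf m (runA key L g) p = gf m g (comp m key 1 L p) := by
  intro L
  induction L with
  | nil => intro g _ hs; exact ⟨hs, fun p _ => rfl⟩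
  | cons s T ih =>
    intro g hv hs
    have hsv := hv s (by simp)
    have hTv : ValidL n m T := fun x hx => hv x (by simp [hx])
    have hs' := rot_shape (d := keyAt key s.2) hs hsv
    obtain ⟨ihs, ihgf⟩ := ih hTv hs'
    refine ⟨ihs, fun p hp => ?_⟩
    show gf m (runA key T _) p = _
    rw [ihgf p hp,
      gf_rot hs hsv (comp_lt (key := key) (sgn := 1) hTv hp)]
    simp only [comp, one_mul]

-- counter bookkeeping: A's loop state i always equals (#processed) % len(key)
theorem mod_succ_mod (k len : Nat) : (k % len + 1) % len = (k + 1) % len := by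
  conv_rhs => rw [Nat.add_mod]
  rw [Nat.add_mod (k % len) 1, Nat.mod_mod_of_dvd _ (dvd_refl len)]

theorem loopA {key : String} :
    ∀ (L : List (Nat × Nat)) (g : List (List Int)) (k : Nat),
    L.foldl (fun st rc => (rotateA (key.toList.getD st.2 ' ') st.1 rc.1 rc.2,
        (st.2 + 1) % key.length)) (g, k % key.length)
      = (runA key (L.zipIdx k) g, (k + L.length) % key.length) := by
  intro L
  induction L with
  | nil => intro g k; simp [runA]
  | cons a T ih =>
    intro g k
    show T.foldl _ (rotateA (key.toList.getD (k % key.length) ' ') g a.1 a.2,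
      (k % key.length + 1) % key.length) = _
    rw [mod_succ_mod, ih (rotateA (key.toList.getD (k % key.length) ' ') g a.1 a.2) (k + 1),
      List.zipIdx_cons, Prod.mk.injEq]
    refine ⟨rfl, ?_⟩
    congr 1
    simp only [List.length_cons]
    omega

-- ---- B's loop as downB ----
def downB (m : Nat) (key : String) (cells : List (Nat × Nat)) :
    Nat → List Int → List Int
  | 0, fl => fl
  | k + 1, fl => downB m key cells k (stepB m key cells fl k)

theorem downB_eq {m : Nat} {key : String} {cells : List (Nat × Nat)} :
    ∀ (k : Nat) (fl : List Int),
    ((List.range k).reverse).foldl (stepB m key cells) fl = downB m key cells k fl := by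
  intro k
  induction k with
  | zero => intro fl; rfl
  | succ k ih =>
    intro fl
    rw [List.range_succ, List.reverse_append]
    show ((List.range k).reverse).foldl (stepB m key cells) (stepB m key cells fl k)
      = downB m key cells (k + 1) fl
    rw [ih]
    rfl

theorem neg_offA (d : Char) : (if d = 'L' then (-1 : Int) else 1) = -(offA d) := by
  unfold offA; split_ifs <;> ring

theorem stepB_char {n m r c idx : Nat} {key : String} {cells : List (Nat × Nat)}
    {fl : List Int} (hrc : cells.getD idx (0, 0) = (r, c)) (h : Intr n m r c)
    (hlen : fl.length = n * m) :
    (stepB m key cells fl idx).length = n * m ∧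
    ∀ p, p < n * m → (stepB m key cells fl idx).getD p 0
      = fl.getD (sig m r c (-(offA (keyAt key idx))) p) 0 := by
  obtain ⟨h1, h2, h3, h4⟩ := h
  have hkey : (if key.toList.getD (idx % key.length) ' ' = 'L' then (-1 : Int) else 1)
      = -(offA (keyAt key idx)) := by
    unfold keyAt; exact neg_offA _
  simp only [stepB, hrc]
  set PS := ([(-1,0),(-1,1),(0,1),(1,1),(1,0),(1,-1),(0,-1),(-1,-1)] : List (Int × Int)).map (fun d =>
    ((r : Int) + d.1).toNat * m + ((c : Int) + d.2).toNat) with hPS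
  set MS := PS.map (fun p => fl.getD p 0) with hMS
  set KF := (if key.toList.getD (idx % key.length) ' ' = 'L' then (-1 : Int) else 1) with hKF
  have hpos : ∀ i, i < 8 → PS.getD i 0 = nbp m r c i := by
    intro i hi
    interval_cases i <;> simp [hPS, nbp, nbA, N8A]
  have hmem : ∀ t, t < 8 → MS.getD t 0 = fl.getD (nbp m r c t) 0 := by
    intro t ht
    have hlenPS : PS.length = 8 := by simp [hPS]
    rw [hMS, List.getD_eq_getElem?_getD, List.getElem?_map,
      List.getElem?_eq_getElem (by omega : t < PS.length)]
    have := hpos t ht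
    rw [List.getD_eq_getElem?_getD, List.getElem?_eq_getElem (by omega : t < PS.length)] at this
    simp_all
  rw [show (List.foldl (fun fl i =>
      fl.set (PS.getD i 0) (MS.getD (((i : Int) + KF) % 8).toNat 0)) fl (List.range 8))
    = setsF fl ((List.range 8).map (fun i =>
        (PS.getD i 0, MS.getD (((i : Int) + KF) % 8).toNat 0))) from by
    simp only [setsF, List.foldl_map]]
  constructor
  · rw [setsF_length, hlen]
  · intro p hp
    have hpw : ((List.range 8).map (fun i =>
        (PS.getD i 0, MS.getD (((i : Int) + KF) % 8).toNat 0))).Pairwise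
        (fun x y => x.1 ≠ y.1) := by
      apply List.Pairwise.map _ _ pairwise_range8
      intro a b hab
      rw [hpos a (by omega), hpos b (by omega)]
      exact nbp_ne h1 h3 h4 (by omega) hab.2 (by omega)
    cases hx : idx8 m r c p with
    | none =>
      have hne := idx8_none hx
      have hsig : sig m r c (-(offA (keyAt key idx))) p = p := by unfold sig; rw [hx]
      rw [hsig, setsF_untouched ?_]
      intro x hmx
      simp only [List.mem_map, List.mem_range] at hmx
      obtain ⟨i, hi, rfl⟩ := hmx
      rw [hpos i hi]
      exact fun hpe => hne i hi hpe.symm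
    | some i =>
      obtain ⟨hi8, hnbp⟩ := idx8_some hx
      have hKF8 : 0 ≤ ((i : Int) + KF) % 8 ∧ ((i : Int) + KF) % 8 < 8 := by
        constructor <;> omega
      have ht : (((i : Int) + KF) % 8).toNat < 8 := by omega
      have hx0mem : (PS.getD i 0, MS.getD (((i : Int) + KF) % 8).toNat 0)
          ∈ (List.range 8).map (fun i =>
            (PS.getD i 0, MS.getD (((i : Int) + KF) % 8).toNat 0)) := by
        simp only [List.mem_map, List.mem_range]
        exact ⟨i, hi8, rfl⟩
      have hhit := setsF_hit (fl := fl) (by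
          rw [hpos i hi8, hlen]
          exact nbp_lt ⟨h1, h2, h3, h4⟩ hi8) hpw hx0mem
      rw [hpos i hi8] at hhit
      have hrhs : sig m r c (-(offA (keyAt key idx))) (nbp m r c i)
          = nbp m r c ((((i : Int) + KF) % 8).toNat) := by
        unfold sig
        rw [idx8_nbp h1 h3 h4 hi8]
        show nbp m r c ((((i : Int) + -(offA (keyAt key idx))) % 8).toNat) = _
        rw [← hkey]
      rw [← hnbp, hhit, hmem _ ht, hrhs]

theorem mem_zipIdx_fst {α : Type} :
    ∀ {L : List α} {k : Nat} {s : α × Nat}, s ∈ L.zipIdx k → s.1 ∈ L := by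
  intro L
  induction L with
  | nil => intro k s h; simp [List.zipIdx] at h
  | cons a T ih =>
    intro k s h
    rw [List.zipIdx_cons] at h
    rcases List.mem_cons.mp h with h | h
    · subst h; simp
    · exact List.mem_cons_of_mem _ (ih h)

theorem downB_char {n m : Nat} {key : String} {cells : List (Nat × Nat)}
    (hcv : ∀ rc ∈ cells, Intr n m rc.1 rc.2) :
    ∀ k, k ≤ cells.length → ∀ fl : List Int, fl.length = n * m →
    (downB m key cells k fl).length = n * m ∧
    ∀ p, p < n * m → (downB m key cells k fl).getD p 0
      = fl.getD (comp m key (-1) ((cells.take k).zipIdx).reverse p) 0 := by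
  intro k
  induction k with
  | zero => intro _ fl hlen; exact ⟨hlen, fun p _ => rfl⟩
  | succ k ih =>
    intro hk fl hlen
    have hkl : k < cells.length := by omega
    have hrc : cells.getD k (0, 0) = ((cells[k]).1, (cells[k]).2) := by
      rw [List.getD_eq_getElem cells (0, 0) hkl]
    have hintr : Intr n m (cells[k]).1 (cells[k]).2 := hcv _ (List.getElem_mem hkl)
    obtain ⟨hsl, hsv⟩ := stepB_char (key := key) hrc hintr hlen
    obtain ⟨ihl, ihv⟩ := ih (by omega) (stepB m key cells fl k) hsl
    have hval : ValidL n m ((cells.take k).zipIdx).reverse := by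
      intro t ht
      rw [List.mem_reverse] at ht
      exact hcv t.1 (List.mem_of_mem_take (mem_zipIdx_fst ht))
    refine ⟨?_, fun p hp => ?_⟩
    · simp only [downB]
      exact ihl
    simp only [downB]
    rw [ihv p hp]
    rw [hsv _ (comp_lt (key := key) (sgn := -1) hval hp)]
    congr 1
    have htake : cells.take (k + 1) = cells.take k ++ [cells[k]] := by
      rw [List.take_succ, List.getElem?_eq_getElem hkl]
      rfl
    have hlt : (cells.take k).length = k := by rw [List.length_take]; omega
    rw [htake, List.zipIdx_append, hlt, List.reverse_append]
    simp only [List.zipIdx_cons, List.zipIdx_nil, List.reverse_cons, List.reverse_nil,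
      List.nil_append, List.singleton_append, comp, Nat.zero_add, neg_one_mul]

-- ---- the full index grid in row-major order ----
def PLd (n m : Nat) : List (Nat × Nat) :=
  (List.range n).flatMap (fun r => (List.range m).map (fun c => (r, c)))

theorem mem_PLd {n m : Nat} {rc : Nat × Nat} : rc ∈ PLd n m ↔ rc.1 < n ∧ rc.2 < m := by
  simp only [PLd, List.mem_flatMap, List.mem_map, List.mem_range]
  constructor
  · rintro ⟨r, hr, c, hc, rfl⟩
    exact ⟨hr, hc⟩
  · rintro ⟨h1, h2⟩
    exact ⟨rc.1, h1, rc.2, h2, Prod.mk.eta⟩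

theorem PLd_pairwise {m : Nat} : ∀ n, (PLd n m).Pairwise (· ≠ ·) := by
  intro n
  induction n with
  | zero => simp [PLd]
  | succ n ih =>
    rw [PLd, List.range_succ, List.flatMap_append, List.pairwise_append]
    refine ⟨ih, ?_, ?_⟩
    · simp only [List.flatMap_cons, List.flatMap_nil, List.append_nil]
      apply List.Pairwise.map _ _ (List.pairwise_lt_range (n := m))
      intro a b hab
      simp only [ne_eq, Prod.mk.injEq, not_and]
      omega
    · intro x hx y hy
      have hx1 : x.1 < n := (mem_PLd.mp hx).1
      have hy1 : y.1 = n := by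
        simp only [List.flatMap_cons, List.flatMap_nil, List.append_nil, List.mem_map] at hy
        obtain ⟨c, _, rfl⟩ := hy
        rfl
      intro he
      rw [he] at hx1
      omega

theorem zeros_shape {n m : Nat} :
    Shape ((List.range n).map (fun _ => (List.range m).map (fun _ => (0 : Int)))) n m := by
  constructor
  · simp
  · intro row hrow
    simp only [List.mem_map, List.mem_range] at hrow
    obtain ⟨r, _, rfl⟩ := hrow
    simp

theorem pairwise_mem_strength {α : Type} {R : α → α → Prop} {l : List α}
    (h : l.Pairwise R) : l.Pairwise (fun x y => x ∈ l ∧ y ∈ l ∧ R x y) := by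
  induction l with
  | nil => exact List.Pairwise.nil
  | cons a T ih =>
    obtain ⟨ha, hT⟩ := List.pairwise_cons.mp h
    refine List.pairwise_cons.mpr ⟨?_, ?_⟩
    · intro b hb
      exact ⟨by simp, by simp [hb], ha b hb⟩
    · apply (ih hT).imp_of_mem
      intro x y hx hy hxy
      exact ⟨by simp [hxy.1], by simp [hxy.2.1], hxy.2.2⟩

theorem gg0_char {n m : Nat} :
    Shape (setsFold ((List.range n).map (fun _ => (List.range m).map (fun _ => (0 : Int))))
      ((PLd n m).map (fun rc => (rc, ffA rc.1 rc.2 m)))) n m ∧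
    ∀ p, p < n * m →
      gf m (setsFold ((List.range n).map (fun _ => (List.range m).map (fun _ => (0 : Int))))
        ((PLd n m).map (fun rc => (rc, ffA rc.1 rc.2 m)))) p = (p : Int) := by
  have hb : ∀ x ∈ (PLd n m).map (fun rc => (rc, ffA rc.1 rc.2 m)), x.1.1 < n ∧ x.1.2 < m := by
    intro x hx
    simp only [List.mem_map] at hx
    obtain ⟨rc, hrc, rfl⟩ := hx
    exact mem_PLd.mp hrc
  refine ⟨setsFold_shape zeros_shape (fun x hx => (hb x hx).1), fun p hp => ?_⟩
  have hm : 0 < m := by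
    rcases Nat.eq_zero_or_pos m with h | h
    · rw [h, Nat.mul_zero] at hp; omega
    · exact h
  have hdn : p / m < n := by
    rw [Nat.div_lt_iff_lt_mul hm]
    exact hp
  have hdm : p % m < m := Nat.mod_lt _ hm
  have hmem : ((p / m, p % m), ffA (p / m) (p % m) m)
      ∈ (PLd n m).map (fun rc => (rc, ffA rc.1 rc.2 m)) := by
    simp only [List.mem_map]
    exact ⟨(p / m, p % m), mem_PLd.mpr ⟨hdn, hdm⟩, rfl⟩
  have hpw : ((PLd n m).map (fun rc => (rc, ffA rc.1 rc.2 m))).Pairwise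
      (fun x y => x.1 ≠ y.1) := by
    apply List.Pairwise.map _ _ (PLd_pairwise n)
    intro a b hab
    simpa using hab
  have hhit := setsFold_hit zeros_shape hb hpw hmem
  show get2A _ (p / m) (p % m) = _
  rw [hhit]
  show ((p / m * m + p % m : Nat) : Int) = (p : Int)
  rw [Nat.div_add_mod']

theorem final_char {n m : Nat} {key : String} {gg : List (List Int)}
    {SA : List ((Nat × Nat) × Nat)} (hval : ValidL n m SA)
    (hgg : ∀ p, p < n * m → gf m gg p = ((comp m key 1 SA p : Nat) : Int)) :
    Shape (setsFold ((List.range n).map (fun _ => (List.range m).map (fun _ => (0 : Int))))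
      ((PLd n m).map (fun rc =>
        (((PySem.Int.floordiv (get2A gg rc.1 rc.2) (m : Int)).toNat,
          (PySem.Int.mod (get2A gg rc.1 rc.2) (m : Int)).toNat), ffA rc.1 rc.2 m)))) n m ∧
    ∀ x, x < n * m →
    gf m (setsFold ((List.range n).map (fun _ => (List.range m).map (fun _ => (0 : Int))))
      ((PLd n m).map (fun rc =>
        (((PySem.Int.floordiv (get2A gg rc.1 rc.2) (m : Int)).toNat,
          (PySem.Int.mod (get2A gg rc.1 rc.2) (m : Int)).toNat), ffA rc.1 rc.2 m)))) x
    = ((comp m key (-1) SA.reverse x : Nat) : Int) := by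
  have hvalrev : ValidL n m SA.reverse := by
    intro s hs
    exact hval s (List.mem_reverse.mp hs)
  have hF : ∀ rc : Nat × Nat, rc.1 < n → rc.2 < m →
      ((PySem.Int.floordiv (get2A gg rc.1 rc.2) (m : Int)).toNat,
        (PySem.Int.mod (get2A gg rc.1 rc.2) (m : Int)).toNat)
      = ((comp m key 1 SA (rc.1 * m + rc.2)) / m, (comp m key 1 SA (rc.1 * m + rc.2)) % m) := by
    intro rc h1 h2
    rw [get2A_eq_gf h2]
    show ((PySem.Int.floordiv (gf m gg (rc.1 * m + rc.2)) (m : Int)).toNat,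
      (PySem.Int.mod (gf m gg (rc.1 * m + rc.2)) (m : Int)).toNat) = _
    rw [hgg _ (cell_lt h1 h2)]
    rw [PySem.Int.floordiv_natCast (comp m key 1 SA (rc.1 * m + rc.2)) m,
      PySem.Int.mod_natCast (comp m key 1 SA (rc.1 * m + rc.2)) m,
      Int.toNat_natCast, Int.toNat_natCast]
  have hinj : ∀ a ∈ PLd n m, ∀ b ∈ PLd n m, a ≠ b →
      comp m key 1 SA (a.1 * m + a.2) ≠ comp m key 1 SA (b.1 * m + b.2) := by
    intro a ha b hb hne heq
    obtain ⟨ha1, ha2⟩ := mem_PLd.mp ha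
    obtain ⟨hb1, hb2⟩ := mem_PLd.mp hb
    have hpa := cell_lt ha1 ha2
    have hpb := cell_lt hb1 hb2
    have h2 : a.1 * m + a.2 = b.1 * m + b.2 := by
      rw [← comp_inv2 (key := key) hval hpa, heq, comp_inv2 (key := key) hval hpb]
    have := flat_inj ha2 hb2 h2
    exact hne (Prod.ext this.1 this.2)
  have hb : ∀ x ∈ (PLd n m).map (fun rc =>
      (((PySem.Int.floordiv (get2A gg rc.1 rc.2) (m : Int)).toNat,
        (PySem.Int.mod (get2A gg rc.1 rc.2) (m : Int)).toNat), ffA rc.1 rc.2 m)),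
      x.1.1 < n ∧ x.1.2 < m := by
    intro y hy
    simp only [List.mem_map] at hy
    obtain ⟨rc, hrc, rfl⟩ := hy
    obtain ⟨h1, h2⟩ := mem_PLd.mp hrc
    have hm : 0 < m := by omega
    show ((PySem.Int.floordiv (get2A gg rc.1 rc.2) (m : Int)).toNat,
      (PySem.Int.mod (get2A gg rc.1 rc.2) (m : Int)).toNat).1 < n ∧ _ < m
    rw [hF rc h1 h2]
    have hC := comp_lt (key := key) (sgn := 1) hval (cell_lt h1 h2)
    constructor
    · show comp m key 1 SA (rc.1 * m + rc.2) / m < n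
      rw [Nat.div_lt_iff_lt_mul hm]
      exact hC
    · exact Nat.mod_lt _ hm
  refine ⟨setsFold_shape zeros_shape (fun x hx => (hb x hx).1), fun x hx => ?_⟩
  have hm : 0 < m := by
    rcases Nat.eq_zero_or_pos m with h | h
    · rw [h, Nat.mul_zero] at hx; omega
    · exact h
  have hpw : ((PLd n m).map (fun rc =>
      (((PySem.Int.floordiv (get2A gg rc.1 rc.2) (m : Int)).toNat,
        (PySem.Int.mod (get2A gg rc.1 rc.2) (m : Int)).toNat), ffA rc.1 rc.2 m))).Pairwise
      (fun x y => x.1 ≠ y.1) := by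
    apply List.Pairwise.map _ _ (pairwise_mem_strength (PLd_pairwise n))
    intro a b hab heq
    obtain ⟨hamem, hbmem, hne⟩ := hab
    obtain ⟨ha1, ha2⟩ := mem_PLd.mp hamem
    obtain ⟨hb1, hb2⟩ := mem_PLd.mp hbmem
    rw [hF a ha1 ha2, hF b hb1 hb2, Prod.mk.injEq] at heq
    apply hinj a hamem b hbmem hne
    rw [← Nat.div_add_mod' (comp m key 1 SA (a.1 * m + a.2)) m,
      ← Nat.div_add_mod' (comp m key 1 SA (b.1 * m + b.2)) m, heq.1, heq.2]
  set p0 := comp m key (-1) SA.reverse x with hp0def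
  have hp0 : p0 < n * m := comp_lt (key := key) (sgn := -1) hvalrev hx
  have hdn : p0 / m < n := by
    rw [Nat.div_lt_iff_lt_mul hm]
    exact hp0
  have hdm : p0 % m < m := Nat.mod_lt _ hm
  have hCp0 : comp m key 1 SA (p0 / m * m + p0 % m) = x := by
    rw [Nat.div_add_mod' p0 m, hp0def]
    exact comp_inv1 (key := key) hval hx
  have hmem : ((((PySem.Int.floordiv (get2A gg (p0 / m) (p0 % m)) (m : Int)).toNat,
      (PySem.Int.mod (get2A gg (p0 / m) (p0 % m)) (m : Int)).toNat), ffA (p0 / m) (p0 % m) m))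
      ∈ (PLd n m).map (fun rc =>
        (((PySem.Int.floordiv (get2A gg rc.1 rc.2) (m : Int)).toNat,
          (PySem.Int.mod (get2A gg rc.1 rc.2) (m : Int)).toNat), ffA rc.1 rc.2 m)) := by
    simp only [List.mem_map]
    exact ⟨(p0 / m, p0 % m), mem_PLd.mpr ⟨hdn, hdm⟩, rfl⟩
  have hhit := setsFold_hit zeros_shape hb hpw hmem
  have hcell : ((PySem.Int.floordiv (get2A gg (p0 / m) (p0 % m)) (m : Int)).toNat,
      (PySem.Int.mod (get2A gg (p0 / m) (p0 % m)) (m : Int)).toNat) = (x / m, x % m) := by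
    rw [hF (p0 / m, p0 % m) hdn hdm]
    show ((comp m key 1 SA (p0 / m * m + p0 % m)) / m,
      (comp m key 1 SA (p0 / m * m + p0 % m)) % m) = _
    rw [hCp0]
  rw [hcell] at hhit
  show get2A _ (x / m) (x % m) = _
  rw [hhit]
  show ((p0 / m * m + p0 % m : Nat) : Int) = _
  rw [Nat.div_add_mod']

theorem getElem_get2A {g : List (List Int)} {r c : Nat} (h1 : r < g.length)
    (h2 : c < (g[r]'h1).length) : (g[r]'h1)[c]'h2 = get2A g r c := by
  unfold get2A
  rw [List.getD_eq_getElem g [] h1, List.getD_eq_getElem _ 0 h2]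

-- ===== VERDICT (by name: the statement is the Claim_ definition above) =====
theorem calc_mapping_spec : Claim_equal_calc_mapping := by
  intro grid key _ _
  unfold Spec_calc_mapping
  simp only [calc_mapping, calc_mapping_alt]
  set n := grid.length with hn
  set m := (grid.headD []).length with hm
  set cells := (List.range' 1 (n - 2)).flatMap (fun r =>
    (List.range' 1 (m - 2)).map (fun c => (r, c))) with hcells
  set zeros := (List.range n).map (fun _ => (List.range m).map (fun _ => (0 : Int))) with hzeros
  set flat0 := (List.range (n * m)).map (fun (p : Nat) => (p : Int)) with hflat0
  -- validity of the interior cells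
  have hcv : ∀ rc ∈ cells, Intr n m rc.1 rc.2 := by
    intro rc hrc
    rw [hcells] at hrc
    simp only [List.mem_flatMap, List.mem_map, List.mem_range'] at hrc
    obtain ⟨r, hr, c, hc, rfl⟩ := hrc
    obtain ⟨i, hi, rfl⟩ := hr
    obtain ⟨j, hj, rfl⟩ := hc
    exact ⟨by omega, by omega, by omega, by omega⟩
  -- A: initial grid fill = scatter over the full index grid
  have hbridge0 : (List.range n).foldl (fun g r =>
      (List.range m).foldl (fun g c => set2A g r c (ffA r c m)) g) zeros
      = setsFold zeros ((PLd n m).map (fun rc => (rc, ffA rc.1 rc.2 m))) := by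
    simp only [setsFold, PLd, List.foldl_map, List.foldl_flatMap]
  obtain ⟨hgg0s, hgg0v⟩ := gg0_char (n := n) (m := m)
  rw [← hzeros] at hgg0s hgg0v
  rw [hbridge0]
  -- A: rotation loop = runA over the indexed cell list
  have hflatten : (List.range' 1 (n - 2)).foldl (fun (st : List (List Int) × Nat) r =>
      (List.range' 1 (m - 2)).foldl (fun st c =>
        (rotateA (key.toList.getD st.2 ' ') st.1 r c, (st.2 + 1) % key.length)) st)
      (setsFold zeros ((PLd n m).map (fun rc => (rc, ffA rc.1 rc.2 m))), 0)
      = cells.foldl (fun st rc =>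
        (rotateA (key.toList.getD st.2 ' ') st.1 rc.1 rc.2, (st.2 + 1) % key.length))
      (setsFold zeros ((PLd n m).map (fun rc => (rc, ffA rc.1 rc.2 m))), 0) := by
    conv_rhs => rw [hcells, List.foldl_flatMap]
    simp only [List.foldl_map]
  have hsa := loopA (key := key) cells
    (setsFold zeros ((PLd n m).map (fun rc => (rc, ffA rc.1 rc.2 m)))) 0
  rw [Nat.zero_mod] at hsa
  have hsa1 : ((List.range' 1 (n - 2)).foldl (fun (st : List (List Int) × Nat) r =>
      (List.range' 1 (m - 2)).foldl (fun st c =>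
        (rotateA (key.toList.getD st.2 ' ') st.1 r c, (st.2 + 1) % key.length)) st)
      (setsFold zeros ((PLd n m).map (fun rc => (rc, ffA rc.1 rc.2 m))), 0)).1
      = runA key (cells.zipIdx 0)
        (setsFold zeros ((PLd n m).map (fun rc => (rc, ffA rc.1 rc.2 m)))) := by
    rw [hflatten, hsa]
  rw [hsa1]
  -- the grid after A's rotations realises comp … 1
  have hval : ValidL n m (cells.zipIdx 0) := fun s hs => hcv s.1 (mem_zipIdx_fst hs)
  obtain ⟨hggs, hggv⟩ := runA_spec (key := key) hval hgg0s
  have hggval : ∀ p, p < n * m →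
      gf m (runA key (cells.zipIdx 0)
        (setsFold zeros ((PLd n m).map (fun rc => (rc, ffA rc.1 rc.2 m))))) p
      = ((comp m key 1 (cells.zipIdx 0) p : Nat) : Int) := by
    intro p hp
    rw [hggv p hp]
    exact hgg0v _ (comp_lt (key := key) (sgn := 1) hval hp)
  -- A: the final inversion pass = scatter, characterised by final_char
  have hbridge2 : (List.range n).foldl (fun mp r => (List.range m).foldl (fun mp c =>
      set2A mp (PySem.Int.floordiv (get2A (runA key (cells.zipIdx 0)
          (setsFold zeros ((PLd n m).map (fun rc => (rc, ffA rc.1 rc.2 m))))) r c) (m : Int)).toNat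
        (PySem.Int.mod (get2A (runA key (cells.zipIdx 0)
          (setsFold zeros ((PLd n m).map (fun rc => (rc, ffA rc.1 rc.2 m))))) r c) (m : Int)).toNat
        (ffA r c m)) mp) zeros
      = setsFold zeros ((PLd n m).map (fun rc =>
        (((PySem.Int.floordiv (get2A (runA key (cells.zipIdx 0)
            (setsFold zeros ((PLd n m).map (fun rc => (rc, ffA rc.1 rc.2 m))))) rc.1 rc.2) (m : Int)).toNat,
          (PySem.Int.mod (get2A (runA key (cells.zipIdx 0)
            (setsFold zeros ((PLd n m).map (fun rc => (rc, ffA rc.1 rc.2 m))))) rc.1 rc.2) (m : Int)).toNat),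
          ffA rc.1 rc.2 m))) := by
    simp only [setsFold, PLd, List.foldl_map, List.foldl_flatMap]
  rw [hbridge2]
  obtain ⟨hfs, hfinal⟩ := final_char (n := n) (m := m) (key := key) hval hggval
  rw [← hzeros] at hfs hfinal
  -- B: the reversed loop = downB, characterised by downB_char
  rw [downB_eq cells.length flat0]
  obtain ⟨hBl, hBv⟩ := downB_char (key := key) hcv cells.length (Nat.le_refl _) flat0
    (by rw [hflat0]; simp)
  rw [List.take_length] at hBv
  have hfl0 : ∀ q, q < n * m → flat0.getD q 0 = (q : Int) := by
    intro q hq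
    rw [hflat0, List.getD_eq_getElem?_getD, List.getElem?_map, List.getElem?_range hq]
    rfl
  -- both sides agree entry by entry
  refine List.ext_getElem ?_ ?_
  · rw [hfs.1]
    simp
  · intro r hr1 hr2
    have hrn : r < n := by rw [← hfs.1]; exact hr1
    refine List.ext_getElem ?_ ?_
    · rw [hfs.2 _ (List.getElem_mem hr1)]
      rw [List.getElem_map, List.getElem_range]
      rw [List.length_take, List.length_drop, hBl]
      have h1 : (r + 1) * m ≤ n * m := Nat.mul_le_mul_right m (by omega)
      rw [Nat.succ_mul] at h1
      omega
    · intro c hc1 hc2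
      have hcm : c < m := by
        rw [hfs.2 _ (List.getElem_mem hr1)] at hc1
        exact hc1
      have hpmn : r * m + c < n * m := cell_lt hrn hcm
      rw [getElem_get2A hr1 hc1, get2A_eq_gf hcm]
      have hL := hfinal (r * m + c) hpmn
      rw [show gf m _ (r * m + c) = get2A _ ((r * m + c) / m) ((r * m + c) % m) from rfl] at hL
      rw [hL]
      simp only [List.getElem_map, List.getElem_range, List.getElem_take, List.getElem_drop]
      have hblen : r * m + c < (downB m key cells cells.length flat0).length := by
        rw [hBl]; exact hpmn
      have hgd : (downB m key cells cells.length flat0)[r * m + c]'hblen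
          = (downB m key cells cells.length flat0).getD (r * m + c) 0 :=
        (List.getD_eq_getElem _ 0 hblen).symm
      rw [hgd, hBv _ hpmn, hfl0 _ (comp_lt (key := key) (sgn := -1)
        (fun s hs => hcv s.1 (mem_zipIdx_fst (List.mem_reverse.mp hs))) hpmn)]
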